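-- pv_equiv track=rewrite | github.com/JasonAHeron/NLP-Parser | testing.py | parse_narratives_sum
-- ===== SOURCE A (Python) =====
-- def parse_narratives_sum(list):
--     nar0 = []
--     nar1 = []
--     nar2 = []
--     nar3 = []
--     nar4 = []
--     for line in list:
--         if line[1] == "0":
--             nar0.append(line)
--         elif line[1] == "1":
--             nar1.append(line)
--         elif line[1] == "2":
--             nar2.append(line)
--         elif line[1] == "3":
--             nar3.append(line)
--         elif line[1] == "4":
--             nar4.append(line)
--     return [nar0, nar1, nar2, nar3, nar4]
-- ===== SOURCE B (Python) =====
-- def parse_narratives_sum(list):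
--     return [[line for line in list if line[1] == str(d)] for d in range(5)]
-- ===== Notes on version B (the rewrite author's own statement) =====
-- stated objective: idiomatic
-- what changed: Replaces the single pass with five stateful accumulator lists by five filtering comprehensions, one per digit 0..4, maintaining no per-branch state.
import Mathlib
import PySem

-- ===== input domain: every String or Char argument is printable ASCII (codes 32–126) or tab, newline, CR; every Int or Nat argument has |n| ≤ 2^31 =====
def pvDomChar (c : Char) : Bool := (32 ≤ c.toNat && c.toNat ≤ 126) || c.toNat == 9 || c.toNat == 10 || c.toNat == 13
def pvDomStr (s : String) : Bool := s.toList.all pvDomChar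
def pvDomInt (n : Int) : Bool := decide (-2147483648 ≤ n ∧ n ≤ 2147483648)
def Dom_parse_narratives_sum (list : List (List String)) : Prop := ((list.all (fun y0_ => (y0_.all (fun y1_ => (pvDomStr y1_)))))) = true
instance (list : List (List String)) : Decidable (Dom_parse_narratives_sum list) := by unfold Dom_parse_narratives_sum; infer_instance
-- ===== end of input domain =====

-- B buckets by five list-comprehension filtering passes (one per digit) instead of A's
-- single pass with five accumulator lists; objective: idiomatic, same cost.

-- ===== PORT A =====
-- single pass; five accumulators (nar0..nar4) as a 5-tuple; line[1] via pyGetD (Pre_ keeps it in range)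
def parse_narratives_sum (list : List (List String)) : List (List (List String)) :=
  let s := list.foldl (fun (acc : List (List String) × List (List String) × List (List String) × List (List String) × List (List String)) line =>
      let c := PySem.List.pyGetD line 1 ""
      if c = "0" then (acc.1 ++ [line], acc.2.1, acc.2.2.1, acc.2.2.2.1, acc.2.2.2.2)
      else if c = "1" then (acc.1, acc.2.1 ++ [line], acc.2.2.1, acc.2.2.2.1, acc.2.2.2.2)
      else if c = "2" then (acc.1, acc.2.1, acc.2.2.1 ++ [line], acc.2.2.2.1, acc.2.2.2.2)
      else if c = "3" then (acc.1, acc.2.1, acc.2.2.1, acc.2.2.2.1 ++ [line], acc.2.2.2.2)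
      else if c = "4" then (acc.1, acc.2.1, acc.2.2.1, acc.2.2.2.1, acc.2.2.2.2 ++ [line])
      else acc)
    ([], [], [], [], [])
  [s.1, s.2.1, s.2.2.1, s.2.2.2.1, s.2.2.2.2]

-- ===== PORT B =====
-- [[line for line in list if line[1] == str(d)] for d in range(5)]
def parse_narratives_sum_alt (list : List (List String)) : List (List (List String)) :=
  (PySem.List.pyRange 0 5 1).map (fun d =>
    list.filter (fun line => PySem.List.pyGetD line 1 "" == PySem.Int.toStr d))

-- ===== PRECONDITION & SPEC =====
-- Pre_ excludes exactly the inputs where line[1] raises IndexError (a line shorter than 2) in both A and B.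
def Pre_parse_narratives_sum (list : List (List String)) : Prop :=
  ∀ line ∈ list, PySem.Raise.InRange line.length 1
instance (list : List (List String)) : Decidable (Pre_parse_narratives_sum list) := by unfold Pre_parse_narratives_sum; infer_instance

def pvWitness_parse_narratives_sum : List (List String) := [["x", "0"], ["y", "3"], ["z", "7"]]

def Spec_parse_narratives_sum (list : List (List String)) (out : List (List (List String))) : Prop := out = parse_narratives_sum_alt list
instance (list : List (List String)) (out : List (List (List String))) : Decidable (Spec_parse_narratives_sum list out) := by unfold Spec_parse_narratives_sum; infer_instance

-- ===== CLAIM (what is proved, stated in full; the proofs are below) =====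
def Claim_equal_parse_narratives_sum : Prop := ∀ (list : List (List String)), Dom_parse_narratives_sum list → Pre_parse_narratives_sum list → Spec_parse_narratives_sum list (parse_narratives_sum list)

-- ===== LEMMAS AND PROOFS =====

-- the five filter predicates B uses, with the digit strings spelled out
def pvP (d : String) (line : List String) : Bool := PySem.List.pyGetD line 1 "" == d

-- loop invariant of A's fold: each accumulator collects its filter
theorem pv_fold_inv (l : List (List String))
    (a0 a1 a2 a3 a4 : List (List String)) :
    l.foldl (fun (acc : List (List String) × List (List String) × List (List String) × List (List String) × List (List String)) line =>
      let c := PySem.List.pyGetD line 1 ""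
      if c = "0" then (acc.1 ++ [line], acc.2.1, acc.2.2.1, acc.2.2.2.1, acc.2.2.2.2)
      else if c = "1" then (acc.1, acc.2.1 ++ [line], acc.2.2.1, acc.2.2.2.1, acc.2.2.2.2)
      else if c = "2" then (acc.1, acc.2.1, acc.2.2.1 ++ [line], acc.2.2.2.1, acc.2.2.2.2)
      else if c = "3" then (acc.1, acc.2.1, acc.2.2.1, acc.2.2.2.1 ++ [line], acc.2.2.2.2)
      else if c = "4" then (acc.1, acc.2.1, acc.2.2.1, acc.2.2.2.1, acc.2.2.2.2 ++ [line])
      else acc) (a0, a1, a2, a3, a4)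
    = (a0 ++ l.filter (pvP "0"), a1 ++ l.filter (pvP "1"), a2 ++ l.filter (pvP "2"),
       a3 ++ l.filter (pvP "3"), a4 ++ l.filter (pvP "4")) := by
  induction l generalizing a0 a1 a2 a3 a4 with
  | nil => simp
  | cons line t ih =>
    simp only [List.foldl_cons, List.filter_cons]
    by_cases h0 : PySem.List.pyGetD line 1 "" = "0"
    · simp [h0, pvP, ih]
    · by_cases h1 : PySem.List.pyGetD line 1 "" = "1"
      · simp [h1, pvP, ih]
      · by_cases h2 : PySem.List.pyGetD line 1 "" = "2"
        · simp [h2, pvP, ih]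
        · by_cases h3 : PySem.List.pyGetD line 1 "" = "3"
          · simp [h3, pvP, ih]
          · by_cases h4 : PySem.List.pyGetD line 1 "" = "4"
            · simp [h4, pvP, ih]
            · simp [h0, h1, h2, h3, h4, pvP, ih]

theorem pv_range5 : PySem.List.pyRange 0 5 1 = [0, 1, 2, 3, 4] := by decide

-- ===== VERDICT (by name: the statement is the Claim_ definition above) =====
theorem parse_narratives_sum_spec : Claim_equal_parse_narratives_sum := by
  intro list _ _
  show parse_narratives_sum list = parse_narratives_sum_alt list
  unfold parse_narratives_sum parse_narratives_sum_alt
  rw [pv_range5]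
  simp only [pv_fold_inv, List.map_cons, List.map_nil, List.nil_append]
  have h0 : PySem.Int.toStr 0 = "0" := by decide
  have h1 : PySem.Int.toStr 1 = "1" := by decide
  have h2 : PySem.Int.toStr 2 = "2" := by decide
  have h3 : PySem.Int.toStr 3 = "3" := by decide
  have h4 : PySem.Int.toStr 4 = "4" := by decide
  simp only [h0, h1, h2, h3, h4]
  rfl
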